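-- pv_equiv track=rewrite | github.com/cirosantilli/cirosantilli.github.io | euler/949.py | _count_sum_lt_zero
-- ===== SOURCE A (Python) =====
-- from bisect import bisect_left
-- from typing import Dict, List, Tuple
--
-- def _count_sum_lt_zero(a: Dict[int, int], b: Dict[int, int], mod: int) -> int:
--     b_items = sorted(b.items())
--     b_sums = [s for s, _ in b_items]
--     pref = [0]
--     run = 0
--     for _, c in b_items:
--         run = (run + c) % mod
--         pref.append(run)
--     ans = 0
--     for sa, ca in a.items():
--         idx = bisect_left(b_sums, -sa)
--         ans = (ans + ca * pref[idx]) % mod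
--     return ans
-- ===== SOURCE B (Python) =====
-- def _count_sum_lt_zero(a, b, mod):
--     # Direct double loop: for each a-entry, accumulate (mod-reduced) the b-counts
--     # whose sum makes the pair negative; no sorting, no bisect, no prefix table.
--     ans = 0
--     for sa, ca in a.items():
--         t = 0
--         for sb, cb in b.items():
--             if sa + sb < 0:
--                 t = (t + cb) % mod
--         ans = (ans + ca * t) % mod
--     return ans
-- ===== Notes on version B (the rewrite author's own statement) =====
-- stated objective: simpler
-- what changed: Replaced sort + mod-reduced prefix table + bisect_left with a direct two-loop accumulation: for each a-entry, sum (mod-reduced) the b-counts whose pair sum is negative.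
import Mathlib
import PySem

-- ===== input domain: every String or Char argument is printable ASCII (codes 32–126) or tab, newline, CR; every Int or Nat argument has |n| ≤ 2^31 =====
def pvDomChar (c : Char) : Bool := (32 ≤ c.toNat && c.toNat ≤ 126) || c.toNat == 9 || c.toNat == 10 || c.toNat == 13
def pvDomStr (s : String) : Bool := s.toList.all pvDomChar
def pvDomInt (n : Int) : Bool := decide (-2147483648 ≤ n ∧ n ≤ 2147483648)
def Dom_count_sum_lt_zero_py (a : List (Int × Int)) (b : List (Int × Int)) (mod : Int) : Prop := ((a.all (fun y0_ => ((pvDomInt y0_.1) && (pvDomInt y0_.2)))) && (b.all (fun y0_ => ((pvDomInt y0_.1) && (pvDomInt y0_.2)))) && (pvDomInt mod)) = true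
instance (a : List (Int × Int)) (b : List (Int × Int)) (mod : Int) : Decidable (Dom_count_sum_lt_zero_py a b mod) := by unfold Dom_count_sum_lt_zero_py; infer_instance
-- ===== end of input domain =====

-- B replaces A's sort + mod-reduced prefix table + bisect_left by a direct double loop
-- (per a-entry, mod-accumulate the b-counts with negative pair sum): simpler, not faster.

-- ===== PORT A =====
-- literal port of A: sorted(b.items()) (lexicographic tuple sort), prefix list of
-- mod-reduced running sums, then bisect_left per a-entry; pref[idx] is always in
-- range (idx ≤ len(b_sums) < len(pref)), so pyGetD with default 0 is exact.
def count_sum_lt_zero_py (a : List (Int × Int)) (b : List (Int × Int)) (mod : Int) : Int :=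
  let b_items := PySem.List.sorted2 b (fun p => p.1) (fun p => p.2)
  let b_sums := b_items.map (fun p => p.1)
  let st := b_items.foldl
    (fun (st : List Int × Int) p =>
      let run := PySem.Int.mod (st.2 + p.2) mod
      (st.1 ++ [run], run)) ([0], 0)
  let pref := st.1
  a.foldl (fun ans p =>
    let idx := PySem.List.bisectLeft b_sums (-p.1)
    PySem.Int.mod (ans + p.2 * PySem.List.pyGetD pref (idx : Int) 0) mod) 0

-- ===== PORT B =====
def count_sum_lt_zero_py_alt (a : List (Int × Int)) (b : List (Int × Int)) (mod : Int) : Int :=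
  a.foldl (fun ans p =>
    let t := b.foldl (fun t q =>
      if p.1 + q.1 < 0 then PySem.Int.mod (t + q.2) mod else t) 0
    PySem.Int.mod (ans + p.2 * t) mod) 0

-- ===== PRECONDITION & SPEC =====
-- Pre_ excludes exactly the inputs where Python A raises ZeroDivisionError:
-- mod == 0 with a or b non-empty (if both are empty no '%' is ever executed).
def Pre_count_sum_lt_zero_py (a : List (Int × Int)) (b : List (Int × Int)) (mod : Int) : Prop :=
  mod ≠ 0 ∨ (a = [] ∧ b = [])
instance (a : List (Int × Int)) (b : List (Int × Int)) (mod : Int) : Decidable (Pre_count_sum_lt_zero_py a b mod) := by unfold Pre_count_sum_lt_zero_py; infer_instance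
def pvWitness_count_sum_lt_zero_py : (List (Int × Int)) × (List (Int × Int)) × Int :=
  ([(1, 2), (-4, 3)], [(-3, 4), (2, 5)], 7)

def Spec_count_sum_lt_zero_py (a : List (Int × Int)) (b : List (Int × Int)) (mod : Int) (out : Int) : Prop := out = count_sum_lt_zero_py_alt a b mod
instance (a : List (Int × Int)) (b : List (Int × Int)) (mod : Int) (out : Int) : Decidable (Spec_count_sum_lt_zero_py a b mod out) := by unfold Spec_count_sum_lt_zero_py; infer_instance

-- ===== CLAIM (what is proved, stated in full; the proofs are below) =====
def Claim_equal_count_sum_lt_zero_py : Prop := ∀ (a : List (Int × Int)) (b : List (Int × Int)) (mod : Int), Dom_count_sum_lt_zero_py a b mod → Pre_count_sum_lt_zero_py a b mod → Spec_count_sum_lt_zero_py a b mod (count_sum_lt_zero_py a b mod)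

-- ===== LEMMAS AND PROOFS =====

-- the Python comparison sorted2 uses on pairs of Ints, specialised to the ports' keys
def pvBefore (x y : Int × Int) : Bool :=
  decide (x.1 < y.1) || (!decide (y.1 < x.1) && decide (x.2 < y.2))

lemma insertBy_pairwise_fst (x : Int × Int) (ys : List (Int × Int))
    (h : ys.Pairwise (fun a b => a.1 ≤ b.1)) :
    (PySem.List.insertBy pvBefore x ys).Pairwise (fun a b => a.1 ≤ b.1) := by
  induction ys with
  | nil => simp [PySem.List.insertBy]
  | cons y ys ih =>
    rcases List.pairwise_cons.mp h with ⟨hy, hys⟩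
    by_cases hb : pvBefore x y = true
    · have hxy : x.1 ≤ y.1 := by
        simp [pvBefore] at hb
        rcases hb with h1 | h2 <;> omega
      simp only [PySem.List.insertBy, hb, if_pos]
      exact List.Pairwise.cons
        (by intro z hz
            rcases List.mem_cons.mp hz with rfl | hz
            · exact hxy
            · exact le_trans hxy (hy z hz))
        (List.Pairwise.cons hy hys)
    · have hyx : y.1 ≤ x.1 := by
        simp [pvBefore] at hb
        omega
      simp only [PySem.List.insertBy, hb, if_neg, Bool.false_eq_true, not_false_iff]
      exact List.Pairwise.cons
        (by intro z hz
            rcases (PySem.List.mem_insertBy pvBefore x z ys).mp hz with rfl | hz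
            · exact hyx
            · exact hy z hz)
        (ih hys)

lemma foldl_insertBy_pairwise_fst (xs : List (Int × Int)) :
    ∀ (acc : List (Int × Int)), acc.Pairwise (fun a b => a.1 ≤ b.1) →
    (xs.foldl (fun acc x => PySem.List.insertBy pvBefore x acc) acc).Pairwise
      (fun a b => a.1 ≤ b.1) := by
  induction xs with
  | nil => intro acc h; exact h
  | cons x xs ih =>
    intro acc h
    exact ih _ (insertBy_pairwise_fst x acc h)

lemma sorted2_pairwise_fst (b : List (Int × Int)) :
    (PySem.List.sorted2 b (fun p => p.1) (fun p => p.2)).Pairwise (fun a b => a.1 ≤ b.1) := by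
  have h := foldl_insertBy_pairwise_fst b [] List.Pairwise.nil
  simpa [PySem.List.sorted2, pvBefore] using h

-- the list of mod-reduced running sums A's prefix loop appends, starting from running sum x
def prefMods (m : Int) : List (Int × Int) → Int → List Int
  | [], _ => []
  | p :: t, x => Int.fmod (x + p.2) m :: prefMods m t (x + p.2)

lemma pref_foldl (m : Int) (items : List (Int × Int)) :
    ∀ (l : List Int) (x : Int),
    items.foldl (fun (st : List Int × Int) p =>
        (st.1 ++ [PySem.Int.mod (st.2 + p.2) m], PySem.Int.mod (st.2 + p.2) m))
      (l, Int.fmod x m)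
    = (l ++ prefMods m items x, Int.fmod (x + (items.map (fun p => p.2)).sum) m) := by
  induction items with
  | nil => intro l x; simp [prefMods]
  | cons p t ih =>
    intro l x
    simp only [List.foldl_cons, prefMods, PySem.Int.mod, Int.fmod_add_fmod]
    have := ih (l ++ [Int.fmod (x + p.2) m]) (x + p.2)
    simp only [PySem.Int.mod] at this
    rw [this]
    simp [add_assoc]

lemma pref_getD (m : Int) (items : List (Int × Int)) :
    ∀ (k : Nat) (x : Int), k ≤ items.length →
    (Int.fmod x m :: prefMods m items x).getD k 0
      = Int.fmod (x + ((items.take k).map (fun p => p.2)).sum) m := by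
  induction items with
  | nil =>
    intro k x hk
    simp [Nat.le_zero.mp hk]
  | cons p t ih =>
    intro k x hk
    cases k with
    | zero => simp
    | succ k =>
      simp only [List.getD_cons_succ, prefMods, List.take_succ_cons, List.map_cons,
        List.sum_cons]
      rw [ih k (x + p.2) (by simpa using hk)]
      ring_nf

lemma foldB (m sa : Int) (l : List (Int × Int)) :
    ∀ (x : Int),
    l.foldl (fun t q => if sa + q.1 < 0 then PySem.Int.mod (t + q.2) m else t) (Int.fmod x m)
      = Int.fmod (x + ((l.filter (fun q => decide (sa + q.1 < 0))).map (fun p => p.2)).sum) m := by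
  induction l with
  | nil => intro x; simp
  | cons q t ih =>
    intro x
    simp only [PySem.Int.mod] at ih ⊢
    by_cases hq : sa + q.1 < 0
    · simp only [List.foldl_cons, if_pos hq, Int.fmod_add_fmod]
      rw [ih (x + q.2)]
      simp [hq, add_assoc]
    · simp only [List.foldl_cons, if_neg hq]
      rw [ih x]
      simp [hq]

lemma foldB_zero (m sa : Int) (l : List (Int × Int)) :
    l.foldl (fun t q => if sa + q.1 < 0 then PySem.Int.mod (t + q.2) m else t) 0
      = Int.fmod (((l.filter (fun q => decide (sa + q.1 < 0))).map (fun p => p.2)).sum) m := by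
  have h := foldB m sa l 0
  rw [Int.zero_fmod] at h
  simpa using h

lemma take_bisect_eq_filter (items : List (Int × Int)) (t : Int)
    (h : (items.map (fun p => p.1)).Pairwise (fun a b => a ≤ b)) :
    items.take (PySem.List.bisectLeft (items.map (fun p => p.1)) t)
      = items.filter (fun q => decide (q.1 < t)) := by
  obtain ⟨h1, h2, h3⟩ := PySem.List.bisectLeft_spec (items.map (fun p => p.1)) t h
  set n := PySem.List.bisectLeft (items.map (fun p => p.1)) t with hn
  have hlen : (items.map (fun p => p.1)).length = items.length := List.length_map ..
  conv_rhs => rw [← List.take_append_drop n items]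
  rw [List.filter_append]
  have htake : (items.take n).filter (fun q => decide (q.1 < t)) = items.take n := by
    apply List.filter_eq_self.mpr
    intro x hx
    obtain ⟨j, hj, hxj⟩ := List.mem_iff_getElem.mp hx
    have hjn : j < n := lt_of_lt_of_le hj (by simp)
    have hji : j < items.length := by
      have := hj; simp only [List.length_take] at this; omega
    have hxv : x = items[j] := by rw [← hxj, List.getElem_take]
    have := h2 j (by omega) hjn
    simp only [List.getElem_map] at this
    simp [hxv, this]
  have hdrop : (items.drop n).filter (fun q => decide (q.1 < t)) = [] := by
    apply List.filter_eq_nil_iff.mpr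
    intro x hx
    obtain ⟨j, hj, hxj⟩ := List.mem_iff_getElem.mp hx
    have hji : n + j < items.length := by
      have := hj; simp only [List.length_drop] at this; omega
    have hxv : x = items[n + j] := by rw [← hxj, List.getElem_drop]
    have := h3 (n + j) (by omega) (by omega)
    simp only [List.getElem_map] at this
    simp [hxv]
    omega
  rw [htake, hdrop, List.append_nil]

-- per-a-entry equality of the two inner computations
lemma inner_eq (b : List (Int × Int)) (mod sa : Int) :
    PySem.List.pyGetD
      ((PySem.List.sorted2 b (fun p => p.1) (fun p => p.2)).foldl
        (fun (st : List Int × Int) p =>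
          (st.1 ++ [PySem.Int.mod (st.2 + p.2) mod], PySem.Int.mod (st.2 + p.2) mod))
        ([0], 0)).1
      ((PySem.List.bisectLeft
          ((PySem.List.sorted2 b (fun p => p.1) (fun p => p.2)).map (fun p => p.1)) (-sa) : Nat) : Int) 0
    = b.foldl (fun t q => if sa + q.1 < 0 then PySem.Int.mod (t + q.2) mod else t) 0 := by
  set items := PySem.List.sorted2 b (fun p => p.1) (fun p => p.2) with hitems
  have hpw : (items.map (fun p => p.1)).Pairwise (fun a b => a ≤ b) :=
    List.pairwise_map.mpr (sorted2_pairwise_fst b)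
  set idx := PySem.List.bisectLeft (items.map (fun p => p.1)) (-sa) with hidx
  have hidxle : idx ≤ items.length := by
    have := (PySem.List.bisectLeft_spec (items.map (fun p => p.1)) (-sa) hpw).1
    simpa using this
  -- A's prefix list
  have hpref : (items.foldl
      (fun (st : List Int × Int) p =>
        (st.1 ++ [PySem.Int.mod (st.2 + p.2) mod], PySem.Int.mod (st.2 + p.2) mod))
      ([0], 0)).1 = Int.fmod 0 mod :: prefMods mod items 0 := by
    rw [show (([0], 0) : List Int × Int) = ([Int.fmod 0 mod], Int.fmod 0 mod) by
      rw [Int.zero_fmod]]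
    rw [pref_foldl mod items [Int.fmod 0 mod] 0]
    simp
  rw [hpref, PySem.List.pyGetD_natCast, pref_getD mod items idx 0 hidxle,
    take_bisect_eq_filter items (-sa) hpw]
  -- B's inner loop
  rw [foldB_zero mod sa b]
  rw [zero_add]
  have hfilter : items.filter (fun q => decide (q.1 < -sa))
      = items.filter (fun q => decide (sa + q.1 < 0)) := by
    apply List.filter_congr
    intro q _
    exact decide_eq_decide.mpr (by omega)
  have hperm : (items.filter (fun q => decide (sa + q.1 < 0))).Perm
      (b.filter (fun q => decide (sa + q.1 < 0))) :=
    (PySem.List.sorted2_perm b (fun p => p.1) (fun p => p.2) false).filter _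
  rw [hfilter, (hperm.map (fun p => p.2)).sum_eq]

-- ===== VERDICT (by name: the statement is the Claim_ definition above) =====
theorem count_sum_lt_zero_py_spec : Claim_equal_count_sum_lt_zero_py := by
  intro a b mod _ _
  simp only [Spec_count_sum_lt_zero_py, count_sum_lt_zero_py, count_sum_lt_zero_py_alt]
  have hstep : (fun (ans : Int) (p : Int × Int) =>
      PySem.Int.mod (ans + p.2 *
        PySem.List.pyGetD
          ((PySem.List.sorted2 b (fun p => p.1) (fun p => p.2)).foldl
            (fun (st : List Int × Int) p =>
              (st.1 ++ [PySem.Int.mod (st.2 + p.2) mod], PySem.Int.mod (st.2 + p.2) mod))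
            ([0], 0)).1
          ((PySem.List.bisectLeft
              ((PySem.List.sorted2 b (fun p => p.1) (fun p => p.2)).map (fun p => p.1))
              (-p.1) : Nat) : Int) 0) mod)
      = (fun (ans : Int) (p : Int × Int) =>
      PySem.Int.mod (ans + p.2 *
        b.foldl (fun t q => if p.1 + q.1 < 0 then PySem.Int.mod (t + q.2) mod else t) 0) mod) := by
    funext ans p
    rw [inner_eq b mod p.1]
  rw [hstep]
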